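-- pv_equiv track=rewrite | github.com/ColinRoitt/LSTM-GRN | Line Growth/ENN.py | get_genome_size
-- ===== SOURCE A (Python) =====
-- def get_genome_size(dims):
--     genome_size = 0
--     prev_units = dims[0]
--     for units in dims[1]:
--         # add weights
--         genome_size += prev_units*units
--         # add biases
--         genome_size += units
--         # update prev_units
--         prev_units = units
--     return genome_size
-- ===== SOURCE B (Python) =====
-- def get_genome_size(dims):
--     seq = [dims[0]] + list(dims[1])
--     def seg(i, j):
--         # contribution of consecutive pairs (k, k+1) for i <= k < j
--         if j <= i:
--             return 0
--         if j == i + 1: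
--             return seq[i] * seq[j] + seq[j]
--         m = (i + j) // 2
--         return seg(i, m) + seg(m, j)
--     return seg(0, len(seq) - 1)
-- ===== Notes on version B (the rewrite author's own statement) =====
-- stated objective: alternative
-- what changed: Replaces A's single left-to-right accumulating pass carrying prev_units with a divide-and-conquer recursion over index ranges of the size sequence, combining each consecutive pair's weight+bias contribution by splitting the range at its midpoint.
import Mathlib
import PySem

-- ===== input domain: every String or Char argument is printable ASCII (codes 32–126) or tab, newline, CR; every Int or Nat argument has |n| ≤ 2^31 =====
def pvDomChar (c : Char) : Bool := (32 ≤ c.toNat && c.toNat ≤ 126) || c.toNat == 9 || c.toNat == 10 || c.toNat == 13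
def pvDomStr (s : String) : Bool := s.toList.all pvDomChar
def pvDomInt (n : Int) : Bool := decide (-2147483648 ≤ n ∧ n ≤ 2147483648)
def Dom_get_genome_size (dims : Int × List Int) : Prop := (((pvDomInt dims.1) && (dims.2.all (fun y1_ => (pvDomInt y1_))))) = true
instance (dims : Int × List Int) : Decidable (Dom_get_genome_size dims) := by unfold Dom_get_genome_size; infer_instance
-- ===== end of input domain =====

-- B computes the genome size by divide-and-conquer over index ranges of the size sequence instead of A's single accumulating pass; objective: alternative algorithm.


-- ===== PORT A =====
-- A: single pass carrying (genome_size, prev_units)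
def get_genome_size (dims : Int × List Int) : Int :=
  (dims.2.foldl (fun (st : Int × Int) units => (st.1 + st.2 * units + units, units)) (0, dims.1)).1

-- ===== PORT B =====
-- B's helper seg: divide-and-conquer over index ranges; Python's seq[i]/seq[j] are
-- always nonnegative in-range indices here, so List.getD is exact for them.
-- The fuel argument (= j - i at the call) only makes the recursion structural.
def pvSeg (seq : List Int) : Nat → Nat → Nat → Int
  | 0, _, _ => 0
  | fuel + 1, i, j =>
    if j ≤ i then 0
    else if j = i + 1 then seq.getD i 0 * seq.getD j 0 + seq.getD j 0
    else
      pvSeg seq fuel i ((i + j) / 2) + pvSeg seq fuel ((i + j) / 2) j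

def get_genome_size_alt (dims : Int × List Int) : Int :=
  let seq := dims.1 :: dims.2
  pvSeg seq (seq.length - 1) 0 (seq.length - 1)

-- ===== PRECONDITION & SPEC =====
def Spec_get_genome_size (dims : Int × List Int) (out : Int) : Prop := out = get_genome_size_alt dims
instance (dims : Int × List Int) (out : Int) : Decidable (Spec_get_genome_size dims out) := by unfold Spec_get_genome_size; infer_instance

-- ===== CLAIM =====
def Claim_equal_get_genome_size : Prop := ∀ (dims : Int × List Int), Dom_get_genome_size dims → Spec_get_genome_size dims (get_genome_size dims)

-- ===== LEMMAS AND PROOFS =====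
-- per-pair contribution at index k of seq
def pvPair (seq : List Int) (k : Nat) : Int :=
  seq.getD k 0 * seq.getD (k + 1) 0 + seq.getD (k + 1) 0

lemma pvSeg_eq_sum (seq : List Int) (fuel i j : Nat) (h : i ≤ j) (hf : j - i ≤ fuel) :
    pvSeg seq fuel i j = ∑ k ∈ Finset.Ico i j, pvPair seq k := by
  induction fuel generalizing i j with
  | zero =>
    have : j = i := by omega
    simp [pvSeg, this]
  | succ n ih =>
    rw [pvSeg]
    split
    · have : j = i := by omega
      simp [this]
    · split
      · next h1 h2 =>
        subst h2
        simp [pvPair]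
      · next h1 h2 =>
        have hm1 : i < (i + j) / 2 := by omega
        have hm2 : (i + j) / 2 < j := by omega
        rw [ih i ((i + j) / 2) (by omega) (by omega),
            ih ((i + j) / 2) j (by omega) (by omega),
            Finset.sum_Ico_consecutive _ (by omega) (by omega : (i + j) / 2 ≤ j)]

lemma pvPair_cons (p u : Int) (t : List Int) (k : Nat) :
    pvPair (p :: u :: t) (k + 1) = pvPair (u :: t) k := by
  simp [pvPair]

lemma fold_eq (l : List Int) (acc p : Int) :
    (l.foldl (fun (st : Int × Int) units => (st.1 + st.2 * units + units, units)) (acc, p)).1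
      = acc + ∑ k ∈ Finset.range l.length, pvPair (p :: l) k := by
  induction l generalizing acc p with
  | nil => simp
  | cons u t ih =>
    simp only [List.foldl_cons, ih, List.length_cons]
    rw [Finset.sum_range_succ']
    have h0 : pvPair (p :: u :: t) 0 = p * u + u := by simp [pvPair]
    simp only [pvPair_cons, h0]
    ring

-- ===== VERDICT =====
theorem get_genome_size_spec : Claim_equal_get_genome_size := by
  intro dims _
  unfold Spec_get_genome_size get_genome_size get_genome_size_alt
  rw [fold_eq, pvSeg_eq_sum _ _ _ _ (by omega) (by omega)]
  simp [Nat.Ico_zero_eq_range]
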